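-- pv_equiv track=rewrite | github.com/sergiomb2/VirtualBox | src/VBox/VMM/VMMAll/target-armv8/bsd-spec-analyze.py | compileAlgoFromList
-- ===== SOURCE A (Python) =====
-- def compileAlgoFromList(aiOrderedBits):
--     """
--     Returns an with instructions for extracting the bits from the mask into
--     a compacted form. Each array entry is an array/tuple of source bit [0],
--     destination bit [1], and mask (shifted to pos 0) [2].
--     """
--     aaiAlgo = [];
--     iDstBit = 0;
--     i       = 0;
--     while i < len(aiOrderedBits):
--         iSrcBit = aiOrderedBits[i];
--         cCount  = 1;
--         i      += 1;
--         while i < len(aiOrderedBits) and aiOrderedBits[i] == iSrcBit + cCount: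
--             cCount += 1;
--             i      += 1;
--         aaiAlgo.append([iSrcBit, iDstBit, (1 << cCount) - 1])
--         iDstBit += cCount;
--     return aaiAlgo;
-- ===== SOURCE B (Python) =====
-- def compileAlgoFromList(aiOrderedBits):
--     # Two-phase version: find run boundaries first, then emit one tuple per segment.
--     n = len(aiOrderedBits)
--     if n == 0:
--         return []
--     bounds = [0] + [j for j in range(1, n) if aiOrderedBits[j] != aiOrderedBits[j - 1] + 1] + [n]
--     out = []
--     dst = 0
--     for s, e in zip(bounds, bounds[1:]):
--         out.append([aiOrderedBits[s], dst, (1 << (e - s)) - 1])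
--         dst += e - s
--     return out
-- ===== Notes on version B (the rewrite author's own statement) =====
-- stated objective: alternative
-- what changed: Replaces the inline nested-while run extension with a two-phase decomposition: one adjacent-comparison pass builds the list of run boundary indices, then a single pass over consecutive boundary pairs emits each [src, dst, mask] tuple while advancing the destination-bit accumulator.
import Mathlib
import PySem

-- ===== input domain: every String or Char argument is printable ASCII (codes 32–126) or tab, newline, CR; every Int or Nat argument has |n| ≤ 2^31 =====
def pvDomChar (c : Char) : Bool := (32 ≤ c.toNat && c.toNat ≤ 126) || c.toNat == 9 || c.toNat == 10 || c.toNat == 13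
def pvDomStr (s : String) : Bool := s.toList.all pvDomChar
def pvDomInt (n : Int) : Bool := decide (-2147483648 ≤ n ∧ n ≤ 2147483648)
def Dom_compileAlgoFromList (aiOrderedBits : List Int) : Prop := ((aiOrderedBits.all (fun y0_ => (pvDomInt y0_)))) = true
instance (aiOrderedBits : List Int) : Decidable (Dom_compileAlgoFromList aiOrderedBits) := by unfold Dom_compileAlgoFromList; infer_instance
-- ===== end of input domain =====

-- B replaces A's inline nested-while run extension by a two-phase "find run boundaries,
-- then map boundary pairs to tuples" decomposition (alternative, same cost).


-- ===== PORT A =====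
-- Inner while loop: extends the current run; returns the new (i, cCount).
-- Fuel makes the recursion structural; fuel = xs.length - i always suffices (i increases
-- each step and the guard needs i < xs.length), so the fuel guard never changes the result.
def aInner (xs : List Int) (iSrcBit : Int) : Nat → Nat → Nat → Nat × Nat
  | 0, i, cCount => (i, cCount)
  | fuel + 1, i, cCount =>
      if i < xs.length ∧ xs.getD i 0 = iSrcBit + (cCount : Int) then
        aInner xs iSrcBit fuel (i + 1) (cCount + 1)
      else
        (i, cCount)

-- Outer while loop of A (fuel = xs.length - i suffices: i advances by ≥ 1 per iteration).
def aOuter (xs : List Int) : Nat → Nat → Int → List (List Int) → List (List Int)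
  | 0, _, _, acc => acc
  | fuel + 1, i, iDstBit, acc =>
      if i < xs.length then
        let iSrcBit := xs.getD i 0
        let r := aInner xs iSrcBit (xs.length - (i + 1)) (i + 1) 1
        aOuter xs fuel r.1 (iDstBit + (r.2 : Int))
          (acc ++ [[iSrcBit, iDstBit, ((1 <<< r.2 : Nat) : Int) - 1]])
      else acc

def compileAlgoFromList (aiOrderedBits : List Int) : List (List Int) :=
  aOuter aiOrderedBits aiOrderedBits.length 0 0 []

-- ===== PORT B =====
-- Phase 1: boundary predicate and the interior boundary indices (j in range(1, n)).
def bPred (xs : List Int) (j : Nat) : Bool := xs.getD j 0 != xs.getD (j - 1) 0 + 1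

def bBounds (xs : List Int) : List Nat :=
  0 :: ((List.range' 1 (xs.length - 1)).filter (bPred xs) ++ [xs.length])

-- Phase 2: the zip(bounds, bounds[1:]) loop, as recursion over adjacent boundary pairs.
def bSegs (xs : List Int) (s : Nat) (rest : List Nat) (dst : Int) : List (List Int) :=
  match rest with
  | [] => []
  | e :: rest' =>
      [xs.getD s 0, dst, ((1 <<< (e - s) : Nat) : Int) - 1] :: bSegs xs e rest' (dst + ((e - s : Nat) : Int))

def compileAlgoFromList_alt (aiOrderedBits : List Int) : List (List Int) :=
  if aiOrderedBits.length = 0 then []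
  else
    match bBounds aiOrderedBits with
    | [] => []
    | s :: rest => bSegs aiOrderedBits s rest 0

-- ===== PRECONDITION & SPEC =====
def Spec_compileAlgoFromList (aiOrderedBits : List Int) (out : List (List Int)) : Prop := out = compileAlgoFromList_alt aiOrderedBits
instance (aiOrderedBits : List Int) (out : List (List Int)) : Decidable (Spec_compileAlgoFromList aiOrderedBits out) := by unfold Spec_compileAlgoFromList; infer_instance

-- ===== CLAIM (what is proved, stated in full; the proofs are below) =====
def Claim_equal_compileAlgoFromList : Prop := ∀ (aiOrderedBits : List Int), Dom_compileAlgoFromList aiOrderedBits → Spec_compileAlgoFromList aiOrderedBits (compileAlgoFromList aiOrderedBits)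

-- ===== LEMMAS AND PROOFS =====

-- Full characterisation of the inner loop, given sufficient fuel.
theorem aInner_props (xs : List Int) (v : Int) :
    ∀ f i c, xs.length - i ≤ f →
    i ≤ (aInner xs v f i c).1 ∧
    (aInner xs v f i c).2 = c + ((aInner xs v f i c).1 - i) ∧
    (∀ j, i ≤ j → j < (aInner xs v f i c).1 →
        j < xs.length ∧ xs.getD j 0 = v + (c : Int) + ((j - i : Nat) : Int)) ∧
    (¬ ((aInner xs v f i c).1 < xs.length ∧
        xs.getD (aInner xs v f i c).1 0 = v + (c : Int) + (((aInner xs v f i c).1 - i : Nat) : Int))) ∧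
    (i ≤ xs.length → (aInner xs v f i c).1 ≤ xs.length) := by
  intro f
  induction f with
  | zero =>
    intro i c hf
    simp only [aInner]
    refine ⟨le_refl _, by omega, fun j hj1 hj2 => by omega, ?_, fun h' => by omega⟩
    simp only [Nat.sub_self, Nat.cast_zero, add_zero]
    omega
  | succ f ih =>
    intro i c hf
    rw [aInner]
    by_cases h : i < xs.length ∧ xs.getD i 0 = v + (c : Int)
    · rw [if_pos h]
      obtain ⟨h1, h2, h3, h4, h5⟩ := ih (i + 1) (c + 1) (by omega)
      refine ⟨by omega, by omega, ?_, ?_, fun _ => h5 (by omega)⟩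
      · intro j hj1 hj2
        rcases Nat.eq_or_lt_of_le hj1 with rfl | hj
        · exact ⟨h.1, by simpa using h.2⟩
        · obtain ⟨hl, he⟩ := h3 j (by omega) hj2
          refine ⟨hl, ?_⟩
          rw [he]
          have : ((j - i : Nat) : Int) = ((j - (i+1) : Nat) : Int) + 1 := by omega
          push_cast
          omega
      · intro hcon
        apply h4
        refine ⟨hcon.1, ?_⟩
        rw [hcon.2]
        have h1' := h1
        push_cast
        omega
    · rw [if_neg h]
      refine ⟨le_refl _, by omega, fun j hj1 hj2 => by omega, ?_, fun h' => h'⟩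
      simpa using h

-- The main invariant: from position i < n, the rest of A's outer loop equals acc ++ the
-- B segments for the boundaries strictly after i (for any sufficient outer fuel).
theorem aOuter_eq (xs : List Int) : ∀ f i (dst : Int) acc, xs.length - i ≤ f → i < xs.length →
    aOuter xs f i dst acc =
      acc ++ bSegs xs i ((List.range' (i + 1) (xs.length - (i + 1))).filter (bPred xs) ++ [xs.length]) dst := by
  intro f
  induction f with
  | zero => intro i dst acc hk hi; omega
  | succ f ih =>
    intro i dst acc hk hi
    rw [aOuter]
    rw [if_pos hi]
    set v := xs.getD i 0 with hv
    obtain ⟨h1, h2, h3, h4, h5⟩ := aInner_props xs v (xs.length - (i + 1)) (i + 1) 1 (le_refl _)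
    set i' := (aInner xs v (xs.length - (i + 1)) (i + 1) 1).1 with hi'
    have hle : i' ≤ xs.length := h5 (by omega)
    have hcnt : (aInner xs v (xs.length - (i + 1)) (i + 1) 1).2 = i' - i := by omega
    -- run values: for i ≤ j < i', xs[j] = v + (j - i)
    have hrun : ∀ j, i ≤ j → j < i' → xs.getD j 0 = v + ((j - i : Nat) : Int) := by
      intro j hj1 hj2
      rcases Nat.eq_or_lt_of_le hj1 with rfl | hj
      · simp [hv, List.getD]
      · have := (h3 j (by omega) hj2).2
        rw [this]; push_cast; omega
    -- interior points of the run are not boundaries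
    have hfalse : ∀ j, i < j → j < i' → bPred xs j = false := by
      intro j hj1 hj2
      have e1 := hrun j (by omega) hj2
      have e2 := hrun (j - 1) (by omega) (by omega)
      simp only [bPred, bne_eq_false_iff_eq]
      rw [e1, e2]
      have : ((j - i : Nat) : Int) = ((j - 1 - i : Nat) : Int) + 1 := by omega
      omega
    -- i' is a boundary (if i' < n)
    have htrue : i' < xs.length → bPred xs i' = true := by
      intro hlt
      have e2 := hrun (i' - 1) (by omega) (by omega)
      simp only [bPred, bne_iff_ne, ne_eq]
      intro hcon
      apply h4
      refine ⟨hlt, ?_⟩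
      rw [hcon, e2]
      have : ((i' - (i+1) : Nat) : Int) = ((i' - 1 - i : Nat) : Int) - 1 := by omega
      push_cast
      omega
    have hfilter_nil : ∀ a b, i < a → a + b ≤ i' →
        (List.range' a b).filter (bPred xs) = [] := by
      intro a b ha hb
      rw [List.filter_eq_nil_iff]
      intro j hj
      rw [List.mem_range'_1] at hj
      simpa using hfalse j (by omega) (by omega)
    rcases Nat.eq_or_lt_of_le hle with heq | hlt
    · -- run reaches the end: one last segment
      have hnil : (List.range' (i+1) (xs.length - (i+1))).filter (bPred xs) = [] :=
        hfilter_nil (i+1) (xs.length - (i+1)) (by omega) (by omega)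
      have hstop : ∀ g dst' acc', aOuter xs g i' dst' acc' = acc' := by
        intro g dst' acc'
        cases g with
        | zero => rw [aOuter]
        | succ g => rw [aOuter, if_neg (by omega)]
      rw [hnil, hstop, hcnt]
      have hc2 : i' - i = xs.length - i := by omega
      rw [hc2]
      simp [bSegs, hv, List.getD]
    · -- run ends at boundary i' < n
      have hsplit : (List.range' (i+1) (xs.length - (i+1))).filter (bPred xs)
          = i' :: (List.range' (i'+1) (xs.length - (i'+1))).filter (bPred xs) := by
        have e1 : List.range' (i+1) (xs.length - (i+1))
            = List.range' (i+1) (i' - (i+1)) ++ List.range' ((i+1) + (i' - (i+1))) ((xs.length - (i'+1)) + 1) := by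
          rw [List.range'_append_1]
          congr 1
          omega
        have e2 : (i+1) + (i' - (i+1)) = i' := by omega
        have e3 : List.range' i' ((xs.length - (i'+1)) + 1) = i' :: List.range' (i'+1) (xs.length - (i'+1)) :=
          List.range'_succ ..
        rw [e1, e2, e3, List.filter_append,
            hfilter_nil (i+1) (i' - (i+1)) (by omega) (by omega)]
        simp [htrue hlt]
      rw [hsplit]
      rw [ih i' (dst + ((aInner xs v (xs.length - (i + 1)) (i + 1) 1).2 : Int)) _ (by omega) hlt, hcnt]
      conv_rhs => rw [bSegs.eq_def]
      simp [hv, List.getD]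

-- ===== VERDICT (by name: the statement is the Claim_ definition above) =====
theorem compileAlgoFromList_spec : Claim_equal_compileAlgoFromList := by
  unfold Claim_equal_compileAlgoFromList
  intro xs _
  unfold Spec_compileAlgoFromList compileAlgoFromList compileAlgoFromList_alt bBounds
  by_cases h : xs.length = 0
  · rw [if_pos h]
    cases hxs : xs.length with
    | zero => rw [aOuter]
    | succ n => omega
  · rw [if_neg h]
    simpa using aOuter_eq xs xs.length 0 0 [] (by omega) (by omega)
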